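-- pv_equiv track=rewrite | github.com/erictao04/Reasoning-Motifs | scripts/build_motif_cards.py | unique_contiguous_motifs
-- ===== SOURCE A (Python) =====
-- def unique_contiguous_motifs(tokens: tuple[str, ...], min_len: int, max_len: int) -> set[tuple[str, ...]]:
--     motifs: set[tuple[str, ...]] = set()
--     if not tokens:
--         return motifs
--     local_max = min(max_len, len(tokens))
--     for width in range(max(1, min_len), local_max + 1):
--         for start in range(0, len(tokens) - width + 1):
--             motifs.add(tokens[start : start + width])
--     return motifs
-- ===== SOURCE B (Python) =====
-- def unique_contiguous_motifs(tokens: tuple[str, ...], min_len: int, max_len: int) -> set[tuple[str, ...]]: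
--     motifs: set[tuple[str, ...]] = set()
--     n = len(tokens)
--     for width in range(max(1, min_len), min(max_len, n) + 1):
--         window = tuple(tokens[:width])
--         motifs.add(window)
--         for tok in tokens[width:]:
--             window = window[1:] + (tok,)
--             motifs.add(window)
--     return motifs
-- ===== Notes on version B (the rewrite author's own statement) =====
-- stated objective: alternative
-- what changed: For each width the inner loop no longer re-slices tokens[start:start+width] per index; it walks the remaining tokens once, maintaining the current window incrementally (drop first element, append next token) and inserting it after each step.
import Mathlib
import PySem

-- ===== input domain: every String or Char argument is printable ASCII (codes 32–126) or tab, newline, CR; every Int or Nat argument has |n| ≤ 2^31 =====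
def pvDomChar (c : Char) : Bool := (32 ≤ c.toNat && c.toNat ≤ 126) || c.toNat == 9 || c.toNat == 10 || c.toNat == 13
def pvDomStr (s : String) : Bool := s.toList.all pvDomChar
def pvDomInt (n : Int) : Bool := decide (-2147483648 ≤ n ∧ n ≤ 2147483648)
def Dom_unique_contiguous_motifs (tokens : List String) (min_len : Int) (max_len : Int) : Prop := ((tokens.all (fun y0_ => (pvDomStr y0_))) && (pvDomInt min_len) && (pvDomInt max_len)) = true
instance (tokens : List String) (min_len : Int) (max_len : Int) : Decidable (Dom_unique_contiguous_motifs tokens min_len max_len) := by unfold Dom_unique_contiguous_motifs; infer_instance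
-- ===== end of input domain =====

-- B replaces A's per-window re-slicing by a sliding window maintained incrementally
-- (drop the first token, append the next) for each width; objective: alternative decomposition, same cost.

-- ===== PORT A =====
def unique_contiguous_motifs (tokens : List String) (min_len : Int) (max_len : Int) : List (List String) :=
  let motifs : PySem.Set (List String) := PySem.Set.empty
  if tokens = [] then motifs
  else
    let local_max : Int := min max_len (tokens.length : Int)
    (PySem.List.pyRange (max 1 min_len) (local_max + 1) 1).foldl
      (fun motifs width =>
        (PySem.List.pyRange 0 ((tokens.length : Int) - width + 1) 1).foldl
          (fun motifs start =>
            PySem.Set.add motifs (PySem.List.slice tokens (some start) (some (start + width))))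
          motifs)
      motifs

-- ===== PORT B =====
def unique_contiguous_motifs_alt (tokens : List String) (min_len : Int) (max_len : Int) : List (List String) :=
  let n : Int := (tokens.length : Int)
  (PySem.List.pyRange (max 1 min_len) (min max_len n + 1) 1).foldl
    (fun motifs width =>
      let window := PySem.List.slice tokens none (some width)
      let st := (PySem.List.slice tokens (some width) none).foldl
        (fun (st : PySem.Set (List String) × List String) tok =>
          let w := st.2.tail ++ [tok]
          (PySem.Set.add st.1 w, w))
        (PySem.Set.add motifs window, window)
      st.1)
    PySem.Set.empty

-- ===== PRECONDITION & SPEC =====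
def Spec_unique_contiguous_motifs (tokens : List String) (min_len : Int) (max_len : Int) (out : List (List String)) : Prop := out = unique_contiguous_motifs_alt tokens min_len max_len
instance (tokens : List String) (min_len : Int) (max_len : Int) (out : List (List String)) : Decidable (Spec_unique_contiguous_motifs tokens min_len max_len out) := by unfold Spec_unique_contiguous_motifs; infer_instance

-- ===== CLAIM (what is proved, stated in full; the proofs are below) =====
def Claim_equal_unique_contiguous_motifs : Prop := ∀ (tokens : List String) (min_len : Int) (max_len : Int), Dom_unique_contiguous_motifs tokens min_len max_len → Spec_unique_contiguous_motifs tokens min_len max_len (unique_contiguous_motifs tokens min_len max_len)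

-- ===== LEMMAS AND PROOFS =====

-- B's sliding inner loop inserts exactly the fixed-width windows (l.drop k).take w, k = 0 .. l.length - w,
-- in the same order as A's index loop.
theorem pv_slide_eq (w : Nat) (hw : 0 < w) :
    ∀ (l : List String) (acc : PySem.Set (List String)), w ≤ l.length →
    ((l.drop w).foldl
        (fun (st : PySem.Set (List String) × List String) tok =>
          (PySem.Set.add st.1 (st.2.tail ++ [tok]), st.2.tail ++ [tok]))
        (PySem.Set.add acc (l.take w), l.take w)).1
      = (List.range (l.length - w + 1)).foldl
          (fun a k => PySem.Set.add a ((l.drop k).take w)) acc := by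
  intro l
  induction l with
  | nil => intro acc h; simp at h; omega
  | cons x xs ih =>
    intro acc h
    by_cases hwx : w ≤ xs.length
    · have hlt : w < (x :: xs).length := by simp; omega
      have hget : (x :: xs).drop w = (x :: xs)[w] :: (x :: xs).drop (w + 1) :=
        List.drop_eq_getElem_cons hlt
      have htake : ((x :: xs).take w).tail ++ [(x :: xs)[w]] = xs.take w := by
        obtain ⟨w', rfl⟩ := Nat.exists_eq_add_of_lt hw
        have hw'' : w' < xs.length := by omega
        have h1 : xs.take w' ++ [xs[w']] = xs.take (w' + 1) :=
          (List.take_succ_eq_append_getElem hw'').symm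
        simpa using h1
      have hdrop : (x :: xs).drop (w + 1) = xs.drop w := List.drop_succ_cons
      rw [hget]
      simp only [List.foldl_cons]
      rw [htake, hdrop, ih (PySem.Set.add acc ((x :: xs).take w)) hwx]
      have hlen : (x :: xs).length - w + 1 = (xs.length - w + 1) + 1 := by
        simp; omega
      conv_rhs => rw [hlen, List.range_succ_eq_map]
      simp only [List.foldl_cons, List.foldl_map, List.drop_succ_cons, List.drop_zero]
    · have hw' : (x :: xs).length = w := by simp at h ⊢; omega
      have hd : (x :: xs).drop w = [] := List.drop_eq_nil_of_le (le_of_eq hw')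
      have ht : (x :: xs).take w = x :: xs := List.take_of_length_le (le_of_eq hw')
      rw [hd, hw']
      simp [ht]

-- for an admissible width, A's inner index loop equals B's inner sliding loop
theorem pv_inner_eq (tokens : List String) (w : Nat) (hw : 0 < w) (hle : w ≤ tokens.length)
    (acc : PySem.Set (List String)) :
    (PySem.List.pyRange 0 ((tokens.length : Int) - (w : Int) + 1) 1).foldl
        (fun motifs start =>
          PySem.Set.add motifs (PySem.List.slice tokens (some start) (some (start + (w : Int)))))
        acc
      = ((PySem.List.slice tokens (some (w : Int)) none).foldl
          (fun (st : PySem.Set (List String) × List String) tok =>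
            (PySem.Set.add st.1 (st.2.tail ++ [tok]), st.2.tail ++ [tok]))
          (PySem.Set.add acc (PySem.List.slice tokens none (some (w : Int))), PySem.List.slice tokens none (some (w : Int)))).1 := by
  rw [PySem.List.slice_from_natCast, PySem.List.slice_to_natCast,
      pv_slide_eq w hw tokens acc hle]
  have hcast : (tokens.length : Int) - (w : Int) + 1 = ((tokens.length - w + 1 : Nat) : Int) := by
    push_cast [Nat.sub_add_cancel]; omega
  rw [hcast, PySem.List.pyRange_zero_nat, List.foldl_map]
  apply List.foldl_ext
  intro a k _
  rw [PySem.List.slice_natCast_add]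

theorem unique_contiguous_motifs_eq (tokens : List String) (min_len max_len : Int) :
    unique_contiguous_motifs tokens min_len max_len
      = unique_contiguous_motifs_alt tokens min_len max_len := by
  unfold unique_contiguous_motifs unique_contiguous_motifs_alt
  by_cases htok : tokens = []
  · subst htok
    have : PySem.List.pyRange (max 1 min_len) (min max_len ((List.length ([] : List String)) : Int) + 1) 1 = [] := by
      rw [PySem.List.pyRange_one]
      have h0 : (min max_len ((List.length ([] : List String)) : Int) + 1 - max 1 min_len).toNat = 0 := by
        simp only [List.length_nil, Nat.cast_zero]
        omega
      rw [h0]; simp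
    simp only [this, List.foldl_nil]
    rfl
  · simp only [htok, if_false]
    apply List.foldl_ext
    intro acc width hmem
    rw [PySem.List.mem_pyRange_one] at hmem
    have h1 : 1 ≤ width := le_trans (le_max_left 1 min_len) hmem.1
    have h2 : width ≤ (tokens.length : Int) := by
      have hm := hmem.2
      have := min_le_right max_len ((tokens.length : Int))
      omega
    have hwnat : width = ((width.toNat : Nat) : Int) := by omega
    rw [hwnat]
    exact pv_inner_eq tokens width.toNat (by omega) (by omega) acc

-- ===== VERDICT (by name: the statement is the Claim_ definition above) =====
theorem unique_contiguous_motifs_spec : Claim_equal_unique_contiguous_motifs := by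
  intro tokens min_len max_len _
  unfold Spec_unique_contiguous_motifs
  exact unique_contiguous_motifs_eq tokens min_len max_len
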